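-- pv_equiv track=rewrite | github.com/DataXpertEngineer/dsa-using-python | strings/algorithms/searching.py | kmp_search_all
-- ===== SOURCE A (Python) =====
-- from typing import List, Optional
--
-- def kmp_search_all(text: str, pattern: str) -> List[int]:
--     """
--     Find all occurrences of pattern in text using KMP algorithm.
--
--     Args:
--         text (str): Text to search in
--         pattern (str): Pattern to search for
--
--     Returns:
--         List[int]: List of all starting indices where pattern is found
--
--     Complexity:
--         Time: O(n + m)  - Preprocessing O(m), searching O(n).
--         Space: O(m + k) - Prefix function array + result list.
--     """
--     if not pattern:
--         return list(range(len(text) + 1))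
--     if len(pattern) > len(text):
--         return []
--
--     pi = _compute_prefix_function(pattern)
--     occurrences = []
--     j = 0
--
--     for i in range(len(text)):
--         while j > 0 and text[i] != pattern[j]:
--             j = pi[j - 1]
--
--         if text[i] == pattern[j]:
--             j += 1
--
--         if j == len(pattern):
--             occurrences.append(i - j + 1)
--             j = pi[j - 1]  # Continue searching
--
--     return occurrences
--
-- def _compute_prefix_function(pattern: str) -> List[int]:
--     """Compute prefix function for KMP algorithm."""
--     m = len(pattern)
--     pi = [0] * m
--     j = 0
--
--     for i in range(1, m):
--         while j > 0 and pattern[i] != pattern[j]: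
--             j = pi[j - 1]
--
--         if pattern[i] == pattern[j]:
--             j += 1
--
--         pi[i] = j
--
--     return pi
-- ===== SOURCE B (Python) =====
-- def kmp_search_all(text: str, pattern: str):
--     """Find all (overlapping) occurrences of pattern in text via repeated str.find."""
--     occurrences = []
--     start = 0
--     while True:
--         idx = text.find(pattern, start)
--         if idx == -1:
--             break
--         occurrences.append(idx)
--         start = idx + 1
--     return occurrences
-- ===== Notes on version B (the rewrite author's own statement) =====
-- stated objective: faster
-- what changed: Replaced the KMP prefix-function automaton with a short loop of repeated str.find(pattern, start) calls, advancing start to idx+1 to keep overlapping matches (the empty pattern yields 0..len(text) automatically).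
import Mathlib
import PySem

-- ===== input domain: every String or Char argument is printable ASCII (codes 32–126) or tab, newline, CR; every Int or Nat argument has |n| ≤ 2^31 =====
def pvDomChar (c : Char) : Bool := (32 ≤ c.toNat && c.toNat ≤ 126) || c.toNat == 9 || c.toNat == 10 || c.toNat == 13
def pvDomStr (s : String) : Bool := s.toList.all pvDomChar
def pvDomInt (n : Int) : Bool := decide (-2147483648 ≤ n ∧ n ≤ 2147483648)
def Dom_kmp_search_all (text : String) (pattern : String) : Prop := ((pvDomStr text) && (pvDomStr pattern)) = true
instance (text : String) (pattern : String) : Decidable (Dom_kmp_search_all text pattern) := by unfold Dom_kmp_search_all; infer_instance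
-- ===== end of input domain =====

-- B replaces the KMP automaton (prefix function + single-pass scan) by a simple loop of
-- repeated `text.find(pattern, start)` calls with `start = idx + 1` (overlapping matches);
-- measurably faster in Python since the scan runs inside C's str.find.  Return values only;
-- neither version mutates its arguments.

-- ===== PORT A =====
-- The shared `while j > 0 and X[i] != pattern[j]: j = pi[j-1]` loop of A (it occurs twice,
-- textually identical up to the scanned string).  `fuel` only makes the recursion total;
-- during any actual run j strictly decreases (pi[j-1] < j), so fuel j+1 is never exhausted.
def kmpWhile (P : List Char) (pi : List Nat) (c : Char) : Nat → Nat → Nat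
  | 0, j => j
  | fuel + 1, j =>
    if 0 < j ∧ c ≠ P.getD j ' ' then kmpWhile P pi c fuel (pi.getD (j - 1) 0) else j

-- `_compute_prefix_function`; indices are provably in range during the run, so `getD` is exact.
def computePrefix (P : List Char) : List Nat :=
  ((List.range' 1 (P.length - 1)).foldl
    (fun st i =>
      let j1 := kmpWhile P st.1 (P.getD i ' ') (st.2 + 1) st.2
      let j2 := if P.getD i ' ' = P.getD j1 ' ' then j1 + 1 else j1
      (st.1.set i j2, j2))
    (List.replicate P.length 0, 0)).1

def kmp_search_all (text : String) (pattern : String) : List Int :=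
  let T := text.toList
  let P := pattern.toList
  if P.length = 0 then PySem.List.pyRange 0 (T.length + 1) 1
  else if P.length > T.length then []
  else
    let pi := computePrefix P
    ((List.range T.length).foldl
      (fun st i =>
        let j1 := kmpWhile P pi (T.getD i ' ') (st.2 + 1) st.2
        let j2 := if T.getD i ' ' = P.getD j1 ' ' then j1 + 1 else j1
        if j2 = P.length then (st.1 ++ [(i : Int) - (P.length : Int) + 1], pi.getD (P.length - 1) 0)
        else (st.1, j2))
      (([] : List Int), 0)).1

-- ===== PORT B =====
-- the `while True: idx = text.find(pattern, start); …` loop; fuel len(text)+2 is enough since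
-- start strictly increases and the loop stops once start exceeds len(text).
def altGo (text pattern : String) : Nat → Int → List Int → List Int
  | 0, _, occ => occ
  | fuel + 1, start, occ =>
    let idx := PySem.Str.findFrom text pattern start none
    if idx = -1 then occ
    else altGo text pattern fuel (idx + 1) (occ ++ [idx])

def kmp_search_all_alt (text : String) (pattern : String) : List Int :=
  altGo text pattern (text.toList.length + 2) 0 []

-- ===== PRECONDITION & SPEC =====
def Spec_kmp_search_all (text : String) (pattern : String) (out : List Int) : Prop := out = kmp_search_all_alt text pattern
instance (text : String) (pattern : String) (out : List Int) : Decidable (Spec_kmp_search_all text pattern out) := by unfold Spec_kmp_search_all; infer_instance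

-- ===== CLAIM (what is proved, stated in full; the proofs are below) =====
def Claim_equal_kmp_search_all : Prop := ∀ (text : String) (pattern : String), Dom_kmp_search_all text pattern → Spec_kmp_search_all text pattern (kmp_search_all text pattern)

-- ===== LEMMAS AND PROOFS =====

def occSpec (T P : List Char) : List Int :=
  ((List.range (T.length + 1 - P.length)).filter (fun i => decide (P <+: T.drop i))).map
    (fun i => Int.ofNat i)

def isMaxB (P : List Char) (j k : Nat) : Prop :=
  k < j ∧ P.take k <:+ P.take j ∧ ∀ l, l < j → P.take l <:+ P.take j → l ≤ k
-- base lemmas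
theorem suff_mono (P X : List Char) (k l : Nat) (hkl : k ≤ l) (hl : l ≤ P.length)
    (h1 : P.take k <:+ X) (h2 : P.take l <:+ X) : P.take k <:+ P.take l := by
  apply List.suffix_of_suffix_length_le h1 h2
  simp [List.length_take]
  omega

theorem append_singleton_suffix {α} (a b : List α) (x y : α) :
    a ++ [x] <:+ b ++ [y] ↔ a <:+ b ∧ x = y := by
  constructor
  · rintro ⟨t, ht⟩
    rw [← List.append_assoc] at ht
    have := List.append_inj' ht (by simp)
    exact ⟨⟨t, this.1⟩, by simpa using this.2⟩
  · rintro ⟨⟨t, ht⟩, rfl⟩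
    exact ⟨t, by rw [← List.append_assoc, ht]⟩

theorem take_succ_eq (X : List Char) (i : Nat) (h : i < X.length) :
    X.take (i+1) = X.take i ++ [X.getD i ' '] := by
  rw [List.take_succ]
  congr
  rw [List.getD_eq_getElem _ _ h]
  simp [List.getElem?_eq_getElem h]

theorem take_succ_suffix_iff (P X : List Char) (k : Nat) (hk : k < P.length) (c : Char) :
    P.take (k+1) <:+ X ++ [c] ↔ (P.take k <:+ X ∧ P.getD k ' ' = c) := by
  rw [take_succ_eq P k hk, append_singleton_suffix]

theorem take_suffix_nil (P : List Char) (k : Nat) (hk : k ≤ P.length)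
    (h : P.take k <:+ ([] : List Char)) : k = 0 := by
  have h2 : P.take k = [] := List.suffix_nil.mp h
  rw [List.take_eq_nil_iff] at h2
  rcases h2 with h2 | h2
  · exact h2
  · rw [h2] at hk; simpa using hk

theorem sfx_take_iff_pref_drop (T P : List Char) (i : Nat) (him : P.length ≤ i)
    (hin : i ≤ T.length) : P <:+ T.take i ↔ P <+: T.drop (i - P.length) := by
  constructor
  · rintro ⟨t, ht⟩
    refine ⟨T.drop i, ?_⟩
    have hT : T = T.take i ++ T.drop i := (List.take_append_drop i T).symm
    conv_rhs => rw [hT]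
    rw [List.drop_append_of_le_length (by simp; omega), ← ht]
    have htlen : t.length = i - P.length := by
      have := congrArg List.length ht
      simp at this
      omega
    rw [← htlen, List.drop_left]
  · rintro ⟨t, ht⟩
    refine ⟨T.take (i - P.length), ?_⟩
    have : i = (i - P.length) + P.length := by omega
    conv_rhs => rw [this, List.take_add]
    congr 1
    rw [← ht]
    exact (List.take_left' rfl).symm

theorem kmpWhile_spec (P : List Char) (pi : List Nat) (c : Char) (b : Nat)
    (hb : b ≤ P.length)
    (hpi : ∀ i, i + 1 < b → isMaxB P (i+1) (pi.getD i 0)) (X : List Char) :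
    ∀ fuel j, j < fuel → j < b → P.take j <:+ X →
      (∀ l, l < b → P.take l <:+ X → P.getD l ' ' = c → l ≤ j) →
      kmpWhile P pi c fuel j ≤ j ∧ kmpWhile P pi c fuel j < b ∧
        P.take (kmpWhile P pi c fuel j) <:+ X ∧
        (∀ l, l < b → P.take l <:+ X → P.getD l ' ' = c → l ≤ kmpWhile P pi c fuel j) ∧
        (kmpWhile P pi c fuel j = 0 ∨ P.getD (kmpWhile P pi c fuel j) ' ' = c) := by
  intro fuel
  induction fuel with
  | zero => intro j hj; omega
  | succ fuel ih =>
    intro j hjf hjb hsfx hW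
    by_cases hcond : 0 < j ∧ c ≠ P.getD j ' '
    · rw [kmpWhile, if_pos hcond]
      obtain ⟨hmb1, hmb2, hmb3⟩ := hpi (j - 1) (by omega)
      rw [Nat.sub_add_cancel hcond.1] at hmb1 hmb2 hmb3
      set j2 := pi.getD (j - 1) 0 with hj2
      have hsfx2 : P.take j2 <:+ X := hmb2.trans hsfx
      have hW2 : ∀ l, l < b → P.take l <:+ X → P.getD l ' ' = c → l ≤ j2 := by
        intro l hlb hlsfx hlc
        have hlj : l ≤ j := hW l hlb hlsfx hlc
        have hlne : l ≠ j := by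
          intro h; rw [h] at hlc; exact hcond.2 hlc.symm
        exact hmb3 l (by omega) (suff_mono P X l j (by omega) (by omega) hlsfx hsfx)
      have := ih j2 (by omega) (by omega) hsfx2 hW2
      exact ⟨by omega, this.2.1, this.2.2.1, this.2.2.2.1, this.2.2.2.2⟩
    · rw [kmpWhile, if_neg hcond]
      refine ⟨le_refl _, hjb, hsfx, hW, ?_⟩
      by_cases h0 : j = 0
      · exact Or.inl h0
      · rcases not_and_or.mp hcond with h | h
        · omega
        · exact Or.inr (not_not.mp h).symm

theorem kmpStep_spec (P : List Char) (pi : List Nat) (c : Char) (b j : Nat) (X : List Char)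
    (hb : b ≤ P.length)
    (hpi : ∀ i, i + 1 < b → isMaxB P (i+1) (pi.getD i 0))
    (hjb : j < b) (hsfx : P.take j <:+ X)
    (hmax : ∀ k, k < b → P.take k <:+ X → k ≤ j) :
    (P.take (if c = P.getD (kmpWhile P pi c (j+1) j) ' ' then kmpWhile P pi c (j+1) j + 1
        else kmpWhile P pi c (j+1) j) <:+ X ++ [c]) ∧
    (∀ k, k ≤ b → P.take k <:+ X ++ [c] →
      k ≤ (if c = P.getD (kmpWhile P pi c (j+1) j) ' ' then kmpWhile P pi c (j+1) j + 1
        else kmpWhile P pi c (j+1) j)) ∧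
    (if c = P.getD (kmpWhile P pi c (j+1) j) ' ' then kmpWhile P pi c (j+1) j + 1
        else kmpWhile P pi c (j+1) j) ≤ b ∧
    (if c = P.getD (kmpWhile P pi c (j+1) j) ' ' then kmpWhile P pi c (j+1) j + 1
        else kmpWhile P pi c (j+1) j) ≤ j + 1 := by
  obtain ⟨h1le, h1b, h1sfx, h1W, h1term⟩ :=
    kmpWhile_spec P pi c b hb hpi X (j+1) j (by omega) hjb hsfx
      (fun l hlb hsl _ => hmax l hlb hsl)
  set j1 := kmpWhile P pi c (j+1) j with hj1
  by_cases hc : c = P.getD j1 ' '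
  · rw [if_pos hc]
    refine ⟨?_, ?_, by omega, by omega⟩
    · exact (take_succ_suffix_iff P X j1 (by omega) c).2 ⟨h1sfx, hc.symm⟩
    · intro k hkb hksfx
      match k with
      | 0 => omega
      | l + 1 =>
        obtain ⟨hsl, hlc⟩ := (take_succ_suffix_iff P X l (by omega) c).1 hksfx
        have := h1W l (by omega) hsl hlc
        omega
  · rw [if_neg hc]
    have hj10 : j1 = 0 := by
      rcases h1term with h | h
      · exact h
      · exact absurd h.symm hc
    refine ⟨?_, ?_, by omega, by omega⟩
    · rw [hj10, List.take_zero]; exact List.nil_suffix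
    · intro k hkb hksfx
      match k with
      | 0 => omega
      | l + 1 =>
        obtain ⟨hsl, hlc⟩ := (take_succ_suffix_iff P X l (by omega) c).1 hksfx
        have hl0 : l ≤ j1 := h1W l (by omega) hsl hlc
        rw [hj10] at hl0
        interval_cases l
        rw [hj10] at hc
        exact absurd hlc.symm hc

theorem foldl_range'_inv {σ : Type} (f : σ → Nat → σ) (Inv : Nat → σ → Prop) :
    ∀ (len a : Nat) (s : σ), Inv a s →
      (∀ i t, a ≤ i → i < a + len → Inv i t → Inv (i+1) (f t i)) →
      Inv (a + len) (List.foldl f s (List.range' a len)) := by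
  intro len
  induction len with
  | zero => intro a s h _; simpa using h
  | succ len ih =>
    intro a s h hstep
    rw [List.range'_succ, List.foldl_cons]
    have heq : a + (len + 1) = (a + 1) + len := by omega
    rw [heq]
    exact ih (a+1) (f s a) (hstep a s (le_refl a) (by omega) h)
      (fun i t hi hi2 ht => hstep i t (by omega) (by omega) ht)

def piInv (P : List Char) (i0 : Nat) (st : List Nat × Nat) : Prop :=
  st.1.length = P.length ∧ (∀ l, l < i0 → isMaxB P (l+1) (st.1.getD l 0)) ∧
    st.2 = st.1.getD (i0 - 1) 0

theorem computePrefix_spec (P : List Char) (hm : 1 ≤ P.length) :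
    (computePrefix P).length = P.length ∧
      ∀ l, l < P.length → isMaxB P (l+1) ((computePrefix P).getD l 0) := by
  unfold computePrefix
  have h := foldl_range'_inv
    (fun st i =>
      let j1 := kmpWhile P st.1 (P.getD i ' ') (st.2 + 1) st.2
      let j2 := if P.getD i ' ' = P.getD j1 ' ' then j1 + 1 else j1
      (st.1.set i j2, j2))
    (piInv P) (P.length - 1) 1 (List.replicate P.length 0, 0) ?init ?step
  · have heq : 1 + (P.length - 1) = P.length := by omega
    rw [heq] at h
    exact ⟨h.1, fun l hl => h.2.1 l hl⟩
  case init =>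
    refine ⟨by simp, ?_, by simp⟩
    intro l hl
    interval_cases l
    have : (List.replicate P.length 0).getD 0 0 = 0 := by
      rw [List.getD, List.getElem?_replicate]
      rw [if_pos (by omega)]
      rfl
    rw [this]
    exact ⟨by omega, by simp, fun l hl _ => by omega⟩
  case step =>
    intro i st hi1 hi2 hInv
    obtain ⟨hlen, hset, hj⟩ := hInv
    have him : i < P.length := by omega
    have hprev : isMaxB P i st.2 := by
      have := hset (i - 1) (by omega)
      rw [Nat.sub_add_cancel hi1] at this
      rw [hj]; exact this
    obtain ⟨hjlt, hjsfx, hjmax⟩ := hprev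
    have hstep := kmpStep_spec P st.1 (P.getD i ' ') i st.2 (P.take i)
      (by omega) (fun l hl => hset l (by omega)) hjlt hjsfx (fun k hk => hjmax k hk)
    rw [← take_succ_eq P i him] at hstep
    obtain ⟨hs1, hs2, hs3, _⟩ := hstep
    set j1 := kmpWhile P st.1 (P.getD i ' ') (st.2 + 1) st.2 with hj1
    set j2 := if P.getD i ' ' = P.getD j1 ' ' then j1 + 1 else j1 with hj2
    refine ⟨by simpa using hlen, ?_, ?_⟩
    · intro l hl
      by_cases hli : l = i
      · subst hli
        have hgd : ((st.1.set l j2).getD l 0) = j2 := by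
          simp [List.getD, hlen, him]
        rw [hgd]
        exact ⟨by omega, hs1, fun k hk hksfx => hs2 k (by omega) hksfx⟩
      · have hgd : ((st.1.set i j2).getD l 0) = st.1.getD l 0 := by
          simp [List.getD, List.getElem?_set, hli, Ne.symm hli]
        rw [hgd]
        exact hset l (by omega)
    · simp only [Nat.add_sub_cancel]
      have : ((st.1.set i j2).getD i 0) = j2 := by
        simp [List.getD, hlen, him]
      rw [this]

def occUpTo (T P : List Char) (i : Nat) : List Int :=
  ((List.range (i + 1 - P.length)).filter (fun q => decide (P <+: T.drop q))).map
    (fun q => Int.ofNat q)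

def mainInv (T P : List Char) (pi : List Nat) (i : Nat) (st : List Int × Nat) : Prop :=
  st.2 < P.length ∧ P.take st.2 <:+ T.take i ∧
    (∀ k, k < P.length → P.take k <:+ T.take i → k ≤ st.2) ∧ st.1 = occUpTo T P i

theorem kmpMain (T P : List Char) (hm : 1 ≤ P.length) (hmn : P.length ≤ T.length) :
    (((List.range T.length).foldl
      (fun st i =>
        let j1 := kmpWhile P (computePrefix P) (T.getD i ' ') (st.2 + 1) st.2
        let j2 := if T.getD i ' ' = P.getD j1 ' ' then j1 + 1 else j1
        if j2 = P.length then
          (st.1 ++ [(i : Int) - (P.length : Int) + 1], (computePrefix P).getD (P.length - 1) 0)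
        else (st.1, j2))
      (([] : List Int), 0)).1) = occUpTo T P T.length := by
  obtain ⟨hpilen, hpispec⟩ := computePrefix_spec P hm
  have h := foldl_range'_inv
    (fun st i =>
      let j1 := kmpWhile P (computePrefix P) (T.getD i ' ') (st.2 + 1) st.2
      let j2 := if T.getD i ' ' = P.getD j1 ' ' then j1 + 1 else j1
      if j2 = P.length then
        (st.1 ++ [(i : Int) - (P.length : Int) + 1], (computePrefix P).getD (P.length - 1) 0)
      else (st.1, j2))
    (mainInv T P (computePrefix P)) T.length 0 (([] : List Int), 0) ?init ?step
  · rw [List.range_eq_range']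
    simp only [Nat.zero_add] at h
    exact h.2.2.2
  case init =>
    refine ⟨by omega, by simp, ?_, ?_⟩
    · intro k hk hsfx
      simp only [List.take_zero] at hsfx
      have := take_suffix_nil P k (by omega) hsfx
      omega
    · unfold occUpTo
      have : 0 + 1 - P.length = 0 := by omega
      rw [this]
      simp
  case step =>
    intro i st _ hi2 hInv
    dsimp only
    obtain ⟨hjlt, hjsfx, hjmax, hocc⟩ := hInv
    simp only [Nat.zero_add] at hi2
    have hstep := kmpStep_spec P (computePrefix P) (T.getD i ' ') P.length st.2 (T.take i)
      (le_refl _) (fun l hl => hpispec l (by omega)) hjlt hjsfx hjmax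
    rw [← take_succ_eq T i hi2] at hstep
    obtain ⟨hs1, hs2, hs3, _⟩ := hstep
    set j1 := kmpWhile P (computePrefix P) (T.getD i ' ') (st.2 + 1) st.2 with hj1
    set j2 := if T.getD i ' ' = P.getD j1 ' ' then j1 + 1 else j1 with hj2
    by_cases hj2m : j2 = P.length
    · rw [if_pos hj2m]
      have hPsfx : P <:+ T.take (i+1) := by
        have := hs1; rw [hj2m, List.take_length] at this; exact this
      have hmi : P.length ≤ i + 1 := by
        have := hPsfx.length_le
        rw [List.length_take] at this
        omega
      have hpref : P <+: T.drop (i + 1 - P.length) :=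
        (sfx_take_iff_pref_drop T P (i+1) hmi (by omega)).1 hPsfx
      obtain ⟨hb1, hb2, hb3⟩ := hpispec (P.length - 1) (by omega)
      rw [Nat.sub_add_cancel hm] at hb1 hb2 hb3
      rw [List.take_length] at hb2 hb3
      refine ⟨by omega, ?_, ?_, ?_⟩
      · exact hb2.trans hPsfx
      · intro k hk hksfx
        have hkk := suff_mono P (T.take (i+1)) k P.length (by omega) (le_refl _)
          hksfx (by rw [List.take_length]; exact hPsfx)
        rw [List.take_length] at hkk
        exact hb3 k hk hkk
      · rw [hocc]
        unfold occUpTo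
        have hr : i + 1 + 1 - P.length = (i + 1 - P.length) + 1 := by omega
        rw [hr, List.range_succ, List.filter_append, List.map_append]
        congr 1
        · simp [hpref]
          omega
    · rw [if_neg hj2m]
      refine ⟨by omega, hs1, fun k hk hksfx => hs2 k (by omega) hksfx, ?_⟩
      rw [hocc]
      unfold occUpTo
      by_cases hmi : P.length ≤ i + 1
      · have hr : i + 1 + 1 - P.length = (i + 1 - P.length) + 1 := by omega
        rw [hr, List.range_succ, List.filter_append, List.map_append]
        have : (List.filter (fun q => decide (P <+: T.drop q)) [i + 1 - P.length]) = [] := by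
          simp only [List.filter_cons, List.filter_nil]
          rw [if_neg]
          simp only [decide_eq_true_eq]
          intro hpre
          have hPsfx : P <:+ T.take (i+1) :=
            (sfx_take_iff_pref_drop T P (i+1) hmi (by omega)).2 hpre
          have := hs2 P.length (le_refl _) (by rw [List.take_length]; exact hPsfx)
          omega
        rw [this, List.map_nil, List.append_nil]
      · have hr : i + 1 + 1 - P.length = i + 1 - P.length := by omega
        rw [hr]

-- infix from a later prefix
theorem prefix_drop_infix (T P : List Char) (s i : Nat) (hs : s ≤ i)
    (h : P <+: T.drop i) : P <:+: T.drop s := by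
  rw [← PySem.Chars.isIn_iff_infix, ← PySem.Chars.exists_prefix_drop_iff_isIn]
  exact ⟨i - s, by rwa [List.drop_drop, Nat.add_sub_cancel' hs]⟩

theorem filter_range_least (N r s : Nat) (p : Nat → Prop) [DecidablePred p]
    (hsr : s ≤ r) (hpr : p r) (hrN : r < N)
    (hmin : ∀ i, s ≤ i → i < r → ¬ p i) :
    (List.range N).filter (fun i => decide (s ≤ i ∧ p i)) =
      r :: (List.range N).filter (fun i => decide (r + 1 ≤ i ∧ p i)) := by
  have hsplit : List.range N = List.range' 0 r ++ List.range' r (N - r) := by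
    rw [List.range_eq_range']
    have := @List.range'_append 0 r (N - r) 1
    simp at this
    rw [this, Nat.add_sub_cancel' hrN.le]
  have hsplit2 : List.range N = List.range' 0 (r+1) ++ List.range' (r+1) (N - (r+1)) := by
    rw [List.range_eq_range']
    have := @List.range'_append 0 (r+1) (N - (r+1)) 1
    simp at this
    rw [this, Nat.add_sub_cancel' hrN]
  conv_lhs => rw [hsplit, List.filter_append]
  conv_rhs => rw [hsplit2, List.filter_append]
  have h1 : (List.range' 0 r).filter (fun i => decide (s ≤ i ∧ p i)) = [] := by
    rw [List.filter_eq_nil_iff]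
    intro a ha
    obtain ⟨i, hi, rfl⟩ := List.mem_range'.1 ha
    simp only [decide_eq_true_eq, not_and]
    exact fun hsa => hmin _ hsa (by omega)
  have h2 : (List.range' 0 (r+1)).filter (fun i => decide (r + 1 ≤ i ∧ p i)) = [] := by
    rw [List.filter_eq_nil_iff]
    intro a ha
    obtain ⟨i, hi, rfl⟩ := List.mem_range'.1 ha
    simp only [decide_eq_true_eq, not_and]
    omega
  rw [h1, h2, List.nil_append, List.nil_append]
  have hr1 : List.range' r (N - r) = r :: List.range' (r+1) (N - (r+1)) := by
    have : N - r = (N - (r+1)) + 1 := by omega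
    rw [this, List.range'_succ]
  rw [hr1]
  simp only [List.filter_cons, decide_eq_true_eq]
  rw [if_pos ⟨hsr, hpr⟩]
  congr 1
  apply List.filter_congr
  intro x hx
  obtain ⟨i, hi, rfl⟩ := List.mem_range'.1 hx
  rw [decide_eq_decide]
  constructor <;> (intro h; exact ⟨by omega, h.2⟩)

theorem findFrom_past (T P : List Char) :
    PySem.Chars.findFrom T P ((T.length : Int) + 1) none = -1 := by
  simp [PySem.Chars.findFrom]
  omega
theorem altGo_spec (text pattern : String) :
    ∀ (fuel s : Nat) (occ : List Int), s ≤ text.toList.length + 1 →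
      text.toList.length + 2 - s ≤ fuel →
      altGo text pattern fuel ((s : Nat) : Int) occ =
        occ ++ ((List.range (text.toList.length + 1 - pattern.toList.length)).filter
          (fun i => decide (s ≤ i ∧ pattern.toList <+: text.toList.drop i))).map
            (fun i => Int.ofNat i) := by
  intro fuel
  induction fuel with
  | zero => intro s occ hs hf; omega
  | succ fuel ih =>
    intro s occ hs hf
    simp only [altGo, PySem.Str.findFrom_eq]
    by_cases hsn : s ≤ text.toList.length
    · have hcast := PySem.Chars.findFrom_natCast text.toList pattern.toList s hsn
      by_cases hfind : PySem.Chars.find (text.toList.drop s) pattern.toList = -1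
      · have hffeq : PySem.Chars.findFrom text.toList pattern.toList ((s : Nat) : Int) none = -1 := by
          rw [hcast, if_pos hfind]
        rw [hffeq, if_pos rfl]
        have hnot : ¬ pattern.toList <:+: text.toList.drop s :=
          (PySem.Chars.find_eq_neg_one_iff _ _).1 hfind
        have hnil : ((List.range (text.toList.length + 1 - pattern.toList.length)).filter
            (fun i => decide (s ≤ i ∧ pattern.toList <+: text.toList.drop i))) = [] := by
          rw [List.filter_eq_nil_iff]
          intro a _
          simp only [decide_eq_true_eq, not_and]
          intro hsa hpre
          exact hnot (prefix_drop_infix _ _ _ _ hsa hpre)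
        rw [hnil, List.map_nil, List.append_nil]
      · have hne : PySem.Chars.findFrom text.toList pattern.toList ((s : Nat) : Int) none ≠ -1 := by
          rw [hcast, if_neg hfind]
          have h1 := PySem.Chars.find_nonneg_iff (text.toList.drop s) pattern.toList
          have h2 := PySem.Chars.neg_one_le_find (text.toList.drop s) pattern.toList
          omega
        obtain ⟨hle, hpref, hmin⟩ :=
          PySem.Chars.findFrom_natCast_spec text.toList pattern.toList s hsn hne
        have hidxval : PySem.Chars.findFrom text.toList pattern.toList ((s : Nat) : Int) none
            = (s : Int) + PySem.Chars.find (text.toList.drop s) pattern.toList := by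
          rw [hcast, if_neg hfind]
        have hfle := PySem.Chars.find_le_length (text.toList.drop s) pattern.toList
        rw [List.length_drop] at hfle
        have hf0 : 0 ≤ PySem.Chars.find (text.toList.drop s) pattern.toList := by
          have h2 := PySem.Chars.neg_one_le_find (text.toList.drop s) pattern.toList
          omega
        -- name r for the found index
        have hr : ∃ r : Nat, PySem.Chars.findFrom text.toList pattern.toList ((s : Nat) : Int) none = (r : Int)
            ∧ s ≤ r ∧ r ≤ text.toList.length := by
          refine ⟨((s : Int) + PySem.Chars.find (text.toList.drop s) pattern.toList).toNat, ?_, by omega, by omega⟩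
          rw [hidxval, Int.toNat_of_nonneg (by omega)]
        obtain ⟨r, hreq, hsr, hrn⟩ := hr
        rw [hreq] at hpref hmin
        rw [Int.toNat_natCast] at hpref hmin
        have hrm : r + pattern.toList.length ≤ text.toList.length := by
          have := hpref.length_le
          rw [List.length_drop] at this
          omega
        rw [if_neg hne, hreq]
        rw [filter_range_least (text.toList.length + 1 - pattern.toList.length) r s
            (fun i => pattern.toList <+: text.toList.drop i) hsr hpref (by omega) hmin]
        rw [List.map_cons]
        conv_rhs => rw [List.append_cons]
        have hcast2 : (r : Int) + 1 = (((r + 1 : Nat)) : Int) := by push_cast; ring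
        rw [hcast2]
        exact ih (r + 1) (occ ++ [(r : Int)]) (by omega) (by omega)
    · have hseq : s = text.toList.length + 1 := by omega
      subst hseq
      have hcast1 : (((text.toList.length + 1 : Nat)) : Int) = (text.toList.length : Int) + 1 := by
        push_cast; ring
      rw [hcast1, findFrom_past, if_pos rfl]
      have hnil : ((List.range (text.toList.length + 1 - pattern.toList.length)).filter
          (fun i => decide (text.toList.length + 1 ≤ i ∧ pattern.toList <+: text.toList.drop i))) = [] := by
        rw [List.filter_eq_nil_iff]
        intro a ha
        rw [List.mem_range] at ha
        simp only [decide_eq_true_eq, not_and]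
        omega
      rw [hnil, List.map_nil, List.append_nil]
theorem alt_eq_occSpec' (text pattern : String) :
    kmp_search_all_alt text pattern = occSpec text.toList pattern.toList := by
  unfold kmp_search_all_alt occSpec
  have h0 : (0 : Int) = ((0 : Nat) : Int) := rfl
  rw [h0, altGo_spec text pattern (text.toList.length + 2) 0 [] (by omega) (by omega)]
  rw [List.nil_append]
  have hfe : ((List.range (text.toList.length + 1 - pattern.toList.length)).filter
      (fun i => decide (0 ≤ i ∧ pattern.toList <+: text.toList.drop i))) =
      ((List.range (text.toList.length + 1 - pattern.toList.length)).filter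
      (fun i => decide (pattern.toList <+: text.toList.drop i))) := by
    apply List.filter_congr
    intro x _
    rw [decide_eq_decide]
    simp
  rw [hfe]

theorem kmp_eq_occSpec (text pattern : String) :
    kmp_search_all text pattern = occSpec text.toList pattern.toList := by
  unfold kmp_search_all
  dsimp only
  by_cases h0 : pattern.toList.length = 0
  · rw [if_pos h0]
    unfold occSpec
    rw [h0, Nat.sub_zero]
    rw [PySem.List.pyRange_one]
    have ht : ((text.toList.length : Int) + 1 - 0).toNat = text.toList.length + 1 := by omega
    rw [ht]
    have hP : pattern.toList = [] := List.length_eq_zero_iff.mp h0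
    rw [hP]
    have : (List.range (text.toList.length + 1)).filter
        (fun i => decide (([] : List Char) <+: text.toList.drop i)) =
        List.range (text.toList.length + 1) := by
      apply List.filter_eq_self.mpr
      intro a _
      simp
    rw [this]
    apply List.map_congr_left
    intro x _
    simp
  · rw [if_neg h0]
    by_cases h1 : pattern.toList.length > text.toList.length
    · rw [if_pos h1]
      unfold occSpec
      have : text.toList.length + 1 - pattern.toList.length = 0 := by omega
      rw [this]
      simp
    · rw [if_neg h1]
      have := kmpMain text.toList pattern.toList (by omega) (by omega)
      rw [this]
      unfold occUpTo occSpec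
      rfl

-- ===== VERDICT (by name: the statement is the Claim_ definition above) =====
theorem kmp_search_all_spec : Claim_equal_kmp_search_all := by
  intro text pattern _
  unfold Spec_kmp_search_all
  rw [kmp_eq_occSpec, alt_eq_occSpec']
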